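-- pv_equiv track=rewrite | github.com/Si2-9harth/DSA-Practice-Problems | hashing/intersection_of_unsorted_arrays.py | intersection_x
-- ===== SOURCE A (Python) =====
-- def intersection_x(a,b):
--     x=set(a)
--     res=0
--     for i in b:
--         if i in x:
--             res+=1
--             x.discard(i)
--     return res
-- ===== SOURCE B (Python) =====
-- def intersection_x(a, b):
--     xs = sorted(a)
--     ys = sorted(b)
--     i = j = c = 0
--     n, m = len(xs), len(ys)
--     while i < n and j < m:
--         if xs[i] == ys[j]:
--             v = xs[i]
--             c += 1
--             while i < n and xs[i] == v:
--                 i += 1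
--             while j < m and ys[j] == v:
--                 j += 1
--         elif xs[i] < ys[j]:
--             i += 1
--         else:
--             j += 1
--     return c
-- ===== Notes on version B (the rewrite author's own statement) =====
-- stated objective: alternative
-- what changed: Replaces A's hash-set membership loop (set(a), test each element of b, discard on hit) by a sort-based two-pointer merge: sort both lists and scan them in tandem, counting each matching value once and skipping its duplicates on both sides; no sets are used.
import Mathlib
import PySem

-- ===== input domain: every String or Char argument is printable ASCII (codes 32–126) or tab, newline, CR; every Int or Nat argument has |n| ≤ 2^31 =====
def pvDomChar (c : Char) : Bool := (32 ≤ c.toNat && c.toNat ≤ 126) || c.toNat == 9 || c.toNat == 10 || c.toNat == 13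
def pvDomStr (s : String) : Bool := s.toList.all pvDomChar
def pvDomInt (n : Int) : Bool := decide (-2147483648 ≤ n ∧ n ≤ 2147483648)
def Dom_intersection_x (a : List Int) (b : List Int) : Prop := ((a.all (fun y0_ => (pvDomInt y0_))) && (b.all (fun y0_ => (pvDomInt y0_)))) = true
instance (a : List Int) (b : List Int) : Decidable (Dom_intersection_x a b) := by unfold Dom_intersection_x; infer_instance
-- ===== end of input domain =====

-- B replaces A's hash-set membership loop by a sort-based two-pointer merge that counts
-- each common value once, skipping duplicates on both sides; objective: alternative algorithm.

-- ===== PORT A =====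
-- x = set(a); res = 0; for i in b: if i in x: res += 1; x.discard(i); return res
def intersection_x (a : List Int) (b : List Int) : Int :=
  (b.foldl
    (fun (st : PySem.Set Int × Int) i =>
      if PySem.Set.contains st.1 i then (PySem.Set.discard st.1 i, st.2 + 1) else st)
    (PySem.Set.ofList a, 0)).2

-- ===== PORT B =====
-- the two-pointer while loop of Source B: heads equal → count 1 and skip that value on both
-- sides (the two inner whiles = dropWhile); otherwise advance the side with the smaller head
def pvMergeCount : List Int → List Int → Int
  | [], _ => 0
  | _ :: _, [] => 0
  | x :: xs, y :: ys =>
    if x = y then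
      1 + pvMergeCount (xs.dropWhile (fun z => z == x)) (ys.dropWhile (fun z => z == x))
    else if x < y then
      pvMergeCount xs (y :: ys)
    else
      pvMergeCount (x :: xs) ys
termination_by xs ys => xs.length + ys.length
decreasing_by
  all_goals have h1 := List.length_dropWhile_le (fun z => z == x) xs
  all_goals have h2 := List.length_dropWhile_le (fun z => z == x) ys
  all_goals simp
  all_goals omega

-- xs = sorted(a); ys = sorted(b); two-pointer scan
def intersection_x_alt (a : List Int) (b : List Int) : Int :=
  pvMergeCount (PySem.List.sorted a (fun x => x) false) (PySem.List.sorted b (fun x => x) false)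

-- ===== PRECONDITION & SPEC =====
def Spec_intersection_x (a : List Int) (b : List Int) (out : Int) : Prop := out = intersection_x_alt a b
instance (a : List Int) (b : List Int) (out : Int) : Decidable (Spec_intersection_x a b out) := by unfold Spec_intersection_x; infer_instance

-- ===== CLAIM (what is proved, stated in full; the proofs are below) =====
def Claim_equal_intersection_x : Prop := ∀ (a : List Int) (b : List Int), Dom_intersection_x a b → Spec_intersection_x a b (intersection_x a b)

-- ===== LEMMAS AND PROOFS =====

-- ---- A side: the loop counts the distinct common elements ----

theorem pv_count_split (s : List Int) (hs : s.Nodup) (i : Int) (hi : i ∈ s) (rest : List Int) :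
    (s.filter (fun y => decide (y ∈ i :: rest))).length
      = ((s.filter (fun y => !(y == i))).filter (fun y => decide (y ∈ rest))).length + 1 := by
  induction s with
  | nil => cases hi
  | cons x s' ih =>
    rw [List.nodup_cons] at hs
    by_cases hxi : x = i
    · subst hxi
      have hxs : x ∉ s' := hs.1
      have h1 : List.filter (fun y => decide (y ∈ x :: rest)) (x :: s')
          = x :: List.filter (fun y => decide (y ∈ rest)) s' := by
        rw [List.filter_cons_of_pos (by simp)]
        congr 1
        apply List.filter_congr
        intro y hy
        have hyx : y ≠ x := fun h => hxs (h ▸ hy)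
        simp [hyx]
      have h2 : List.filter (fun y => !(y == x)) (x :: s') = s' := by
        rw [List.filter_cons_of_neg (by simp)]
        apply List.filter_eq_self.mpr
        intro y hy
        have hyx : y ≠ x := fun h => hxs (h ▸ hy)
        simp [hyx]
      rw [h1, h2]
      simp
    · have hi' : i ∈ s' := by
        rcases List.mem_cons.mp hi with h | h
        · exact absurd h.symm hxi
        · exact h
      have h2 : List.filter (fun y => !(y == i)) (x :: s')
          = x :: List.filter (fun y => !(y == i)) s' :=
        List.filter_cons_of_pos (by simp [hxi])
      by_cases hxr : x ∈ rest
      · rw [List.filter_cons_of_pos (by simp [hxr]), h2,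
          List.filter_cons_of_pos (by simp [hxr])]
        simp only [List.length_cons]
        rw [ih hs.2 hi']
      · rw [List.filter_cons_of_neg (by simp [hxi, hxr]), h2,
          List.filter_cons_of_neg (by simp [hxr])]
        exact ih hs.2 hi'

theorem pv_loop (b : List Int) :
    ∀ (s : PySem.Set Int), s.Nodup → ∀ (r : Int),
    (b.foldl
      (fun (st : PySem.Set Int × Int) i =>
        if PySem.Set.contains st.1 i then (PySem.Set.discard st.1 i, st.2 + 1) else st)
      (s, r)).2
      = r + ((s.filter (fun y => decide (y ∈ b))).length : Int) := by
  induction b with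
  | nil => intro s hs r; simp
  | cons i rest ih =>
    intro s hs r
    simp only [List.foldl_cons]
    by_cases hmem : i ∈ s
    · rw [if_pos (by simpa [PySem.Set.contains] using hmem)]
      have hnd : (PySem.Set.discard s i).Nodup := List.Nodup.filter _ hs
      rw [ih (PySem.Set.discard s i) hnd (r + 1)]
      rw [pv_count_split s hs i hmem rest]
      simp only [PySem.Set.discard]
      push_cast
      ring
    · rw [if_neg (by simpa [PySem.Set.contains] using hmem)]
      rw [ih s hs r]
      have : s.filter (fun y => decide (y ∈ i :: rest))
           = s.filter (fun y => decide (y ∈ rest)) := by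
        apply List.filter_congr
        intro y hy
        have : y ≠ i := fun h => hmem (h ▸ hy)
        simp [this]
      rw [this]

-- A's value is the cardinality of the finset intersection
theorem pv_a_eq (a b : List Int) :
    intersection_x a b = ((a.toFinset ∩ b.toFinset).card : Int) := by
  unfold intersection_x
  rw [pv_loop b (PySem.Set.ofList a) (PySem.Set.nodup_ofList a) 0]
  have hnd : ((PySem.Set.ofList a).filter (fun y => decide (y ∈ b))).Nodup :=
    List.Nodup.filter _ (PySem.Set.nodup_ofList a)
  have hlen : ((PySem.Set.ofList a).filter (fun y => decide (y ∈ b))).length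
      = (((PySem.Set.ofList a).filter (fun y => decide (y ∈ b))).toFinset).card :=
    (List.toFinset_card_of_nodup hnd).symm
  have hset : (((PySem.Set.ofList a).filter (fun y => decide (y ∈ b))).toFinset)
      = a.toFinset ∩ b.toFinset := by
    ext z
    simp [PySem.Set.mem_ofList]
  rw [hlen, hset]
  ring

-- ---- B side: the merge counts the same cardinality ----

-- in a sorted list whose elements are all ≥ x, everything surviving dropWhile (== x) is > x
theorem pv_dropWhile_gt (x : Int) :
    ∀ (l : List Int), l.Pairwise (· ≤ ·) → (∀ a ∈ l, x ≤ a) →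
    ∀ z ∈ l.dropWhile (fun a => a == x), x < z := by
  intro l
  induction l with
  | nil => intro _ _ z hz; simp [List.dropWhile] at hz
  | cons a l' ih =>
    intro hp hge z hz
    rw [List.pairwise_cons] at hp
    by_cases hax : a = x
    · rw [List.dropWhile_cons_of_pos (by simp [hax])] at hz
      exact ih hp.2 (fun y hy => hge y (List.mem_cons_of_mem a hy)) z hz
    · rw [List.dropWhile_cons_of_neg (by simp [hax])] at hz
      have hxa : x < a := lt_of_le_of_ne (hge a (List.mem_cons_self)) (fun h => hax h.symm)
      rcases List.mem_cons.mp hz with h | h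
      · exact h ▸ hxa
      · exact lt_of_lt_of_le hxa (hp.1 z h)

-- membership after dropWhile (== x): exactly the members different from x (given all > x survive)
theorem pv_dropWhile_toFinset (x : Int) (l : List Int)
    (hp : l.Pairwise (· ≤ ·)) (hge : ∀ a ∈ l, x ≤ a) :
    (l.dropWhile (fun a => a == x)).toFinset = l.toFinset \ {x} := by
  ext z
  simp only [List.mem_toFinset, Finset.mem_sdiff, Finset.mem_singleton]
  constructor
  · intro hz
    refine ⟨List.Sublist.mem hz (List.dropWhile_sublist _), ?_⟩
    exact ne_of_gt (pv_dropWhile_gt x l hp hge z hz)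
  · rintro ⟨hzl, hzx⟩
    have : z ∉ l.takeWhile (fun a => a == x) := by
      intro hzt
      have := List.mem_takeWhile_imp hzt
      simp at this
      exact hzx this
    have hsplit := List.takeWhile_append_dropWhile (p := fun a => a == x) (l := l)
    rw [← hsplit] at hzl
    rcases List.mem_append.mp hzl with h | h
    · exact absurd h this
    · exact h

theorem pv_merge (N : Nat) :
    ∀ (xs ys : List Int), xs.length + ys.length ≤ N →
    xs.Pairwise (· ≤ ·) → ys.Pairwise (· ≤ ·) →
    pvMergeCount xs ys = ((xs.toFinset ∩ ys.toFinset).card : Int) := by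
  induction N with
  | zero =>
    intro xs ys hN _ _
    have hx : xs = [] := List.eq_nil_of_length_eq_zero (by omega)
    subst hx
    simp [pvMergeCount]
  | succ n ih =>
    intro xs ys hN hpx hpy
    match xs, ys with
    | [], ys => simp [pvMergeCount]
    | x :: xs', [] => simp [pvMergeCount]
    | x :: xs', y :: ys' =>
      rw [List.pairwise_cons] at hpx hpy
      by_cases hxy : x = y
      · subst hxy
        rw [pvMergeCount, if_pos rfl]
        have hgex : ∀ a ∈ xs', x ≤ a := hpx.1
        have hgey : ∀ a ∈ ys', x ≤ a := hpy.1
        have h1 := List.length_dropWhile_le (fun z => z == x) xs'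
        have h2 := List.length_dropWhile_le (fun z => z == x) ys'
        have hrec := ih (xs'.dropWhile (fun z => z == x)) (ys'.dropWhile (fun z => z == x))
          (by simp at hN ⊢; omega)
          (List.Pairwise.sublist (List.dropWhile_sublist _) hpx.2)
          (List.Pairwise.sublist (List.dropWhile_sublist _) hpy.2)
        rw [hrec, pv_dropWhile_toFinset x xs' hpx.2 hgex, pv_dropWhile_toFinset x ys' hpy.2 hgey]
        have hSdiff : (xs'.toFinset \ {x}) ∩ (ys'.toFinset \ {x})
            = ((x :: xs').toFinset ∩ (x :: ys').toFinset).erase x := by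
          ext z
          simp only [Finset.mem_inter, Finset.mem_sdiff, Finset.mem_singleton,
            Finset.mem_erase, List.toFinset_cons, Finset.mem_insert, List.mem_toFinset]
          constructor
          · rintro ⟨⟨h1, h2⟩, ⟨h3, _⟩⟩
            exact ⟨h2, Or.inr h1, Or.inr h3⟩
          · rintro ⟨hne, h1, h2⟩
            rcases h1 with h1 | h1
            · exact absurd h1 hne
            rcases h2 with h2 | h2
            · exact absurd h2 hne
            exact ⟨⟨h1, hne⟩, ⟨h2, hne⟩⟩
        rw [hSdiff]
        have hxmem : x ∈ (x :: xs').toFinset ∩ (x :: ys').toFinset := by simp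
        have := Finset.card_erase_add_one hxmem
        push_cast [← this]
        ring
      · by_cases hlt : x < y
        · rw [pvMergeCount, if_neg hxy, if_pos hlt]
          have hxnot : x ∉ (y :: ys').toFinset := by
            simp only [List.toFinset_cons, Finset.mem_insert, List.mem_toFinset]
            rintro (h | h)
            · exact absurd h hxy
            · exact absurd rfl (ne_of_gt (lt_of_lt_of_le hlt (hpy.1 x h)))
          have hrec := ih xs' (y :: ys') (by simp at hN ⊢; omega) hpx.2
            (List.pairwise_cons.mpr hpy)
          rw [hrec]
          have h0 : (x :: xs').toFinset = insert x xs'.toFinset := List.toFinset_cons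
          rw [h0, Finset.insert_inter_of_notMem hxnot]
        · have hgt : y < x := lt_of_le_of_ne (le_of_not_gt hlt) (fun h => hxy h.symm)
          rw [pvMergeCount, if_neg hxy, if_neg hlt]
          have hynot : y ∉ (x :: xs').toFinset := by
            simp only [List.toFinset_cons, Finset.mem_insert, List.mem_toFinset]
            rintro (h | h)
            · exact absurd h.symm hxy
            · exact absurd rfl (ne_of_gt (lt_of_lt_of_le hgt (hpx.1 y h)))
          have hrec := ih (x :: xs') ys' (by simp at hN ⊢; omega)
            (List.pairwise_cons.mpr hpx) hpy.2
          rw [hrec]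
          have h0 : (y :: ys').toFinset = insert y ys'.toFinset := List.toFinset_cons
          rw [h0, Finset.inter_insert_of_notMem hynot]

theorem pv_alt_eq (a b : List Int) :
    intersection_x_alt a b = ((a.toFinset ∩ b.toFinset).card : Int) := by
  unfold intersection_x_alt
  have hpa : (PySem.List.sorted a (fun x => x) false).Pairwise (· ≤ ·) := by
    have := PySem.List.sorted_pairwise (xs := a) (key := fun x => x)
    simpa using this
  have hpb : (PySem.List.sorted b (fun x => x) false).Pairwise (· ≤ ·) := by
    have := PySem.List.sorted_pairwise (xs := b) (key := fun x => x)
    simpa using this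
  rw [pv_merge ((PySem.List.sorted a (fun x => x) false).length
      + (PySem.List.sorted b (fun x => x) false).length) _ _ le_rfl hpa hpb]
  have ha : (PySem.List.sorted a (fun x => x) false).toFinset = a.toFinset :=
    List.toFinset_eq_of_perm _ _ (PySem.List.sorted_perm ..)
  have hb : (PySem.List.sorted b (fun x => x) false).toFinset = b.toFinset :=
    List.toFinset_eq_of_perm _ _ (PySem.List.sorted_perm ..)
  rw [ha, hb]

-- ===== VERDICT (by name: the statement is the Claim_ definition above) =====
theorem intersection_x_spec : Claim_equal_intersection_x := by
  intro a b _
  unfold Spec_intersection_x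
  rw [pv_a_eq, pv_alt_eq]
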